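-- pv_equiv track=rewrite | github.com/biostochastics/CodeConCat | codeconcat/parser/shared/comment_extractor.py | _extract_block_comment_forward
-- ===== SOURCE A (Python) =====
-- from typing import List, Optional, Tuple
--
-- def _extract_block_comment_forward(
--     lines: List[str], start_line: int, markers: Tuple[str, str]
-- ) -> List[str]:
--     """Extract block comment by searching forward from start marker."""
--     start_marker, end_marker = markers
--     comment_lines: List[str] = []
--
--     # Extract content from start line
--     start_line_text = lines[start_line]
--     start_pos = start_line_text.find(start_marker)
--     after_start = start_line_text[start_pos + len(start_marker) :].strip()
--
--     # Check if single-line block comment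
--     if end_marker in after_start:
--         end_pos = after_start.find(end_marker)
--         content = after_start[:end_pos].strip()
--         return [content] if content else []
--
--     if after_start:
--         comment_lines.append(after_start)
--
--     # Search forward for end marker
--     for i in range(start_line + 1, min(start_line + 50, len(lines))):
--         line = lines[i]
--         if end_marker in line:
--             # Found end marker
--             end_pos = line.find(end_marker)
--             before_end = line[:end_pos].strip()
--             if before_end:
--                 comment_lines.append(before_end)
--             break
--         else:
--             comment_lines.append(line.strip())
--
--     return comment_lines
-- ===== SOURCE B (Python) =====
-- from typing import List, Tuple
--
-- def _extract_block_comment_forward(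
--     lines: List[str], start_line: int, markers: Tuple[str, str]
-- ) -> List[str]:
--     """Locate-then-gather: find the end line first, then collect the pieces."""
--     start_marker, end_marker = markers
--     text = lines[start_line]
--     after_start = text[text.find(start_marker) + len(start_marker):].strip()
--     if end_marker in after_start:
--         content = after_start[: after_start.find(end_marker)].strip()
--         return [content] if content else []
--     window = list(range(start_line + 1, min(start_line + 50, len(lines))))
--     head = [after_start] if after_start else []
--     end_idx = next((i for i in window if end_marker in lines[i]), None)
--     if end_idx is None:
--         return head + [lines[i].strip() for i in window]
--     before_end = lines[end_idx][: lines[end_idx].find(end_marker)].strip()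
--     return (head
--             + [lines[i].strip() for i in range(start_line + 1, end_idx)]
--             + ([before_end] if before_end else []))
-- ===== Notes on version B (the rewrite author's own statement) =====
-- stated objective: alternative
-- what changed: Replaces A's single break-driven loop (one accumulator, break on the end marker) by a two-phase locate-then-gather structure: first find the index of the end line in the 50-line window, then assemble the head, body and before-end pieces by slicing/mapping over index ranges.
import Mathlib
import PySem

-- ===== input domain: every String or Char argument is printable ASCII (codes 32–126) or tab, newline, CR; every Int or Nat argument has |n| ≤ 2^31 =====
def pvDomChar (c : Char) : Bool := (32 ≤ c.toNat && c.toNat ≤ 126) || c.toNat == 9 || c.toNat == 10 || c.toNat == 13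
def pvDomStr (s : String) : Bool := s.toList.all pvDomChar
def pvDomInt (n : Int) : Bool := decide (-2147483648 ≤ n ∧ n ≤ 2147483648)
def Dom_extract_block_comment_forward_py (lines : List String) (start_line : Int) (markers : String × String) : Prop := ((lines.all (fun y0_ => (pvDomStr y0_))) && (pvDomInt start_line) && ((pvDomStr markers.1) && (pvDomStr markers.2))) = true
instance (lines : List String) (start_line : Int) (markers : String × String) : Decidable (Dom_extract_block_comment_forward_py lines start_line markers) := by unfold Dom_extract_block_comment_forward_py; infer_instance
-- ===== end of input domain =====

-- B replaces A's single break-driven scan by a locate-then-gather decomposition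
-- (find the end line first, then collect the pieces); objective: alternative structure, same cost.

-- ===== PORT A =====
-- A's forward-search loop with break, as structural recursion over the index list.
def pvLoopA (lines : List String) (end_marker : String) : List Int → List String → List String
  | [], acc => acc
  | i :: rest, acc =>
    let line := PySem.List.pyGetD lines i ""
    if PySem.Str.isIn end_marker line then
      let end_pos := PySem.Str.find line end_marker
      let before_end := PySem.Str.strip (PySem.Str.slice line none (some end_pos))
      if before_end ≠ "" then acc ++ [before_end] else acc
    else
      pvLoopA lines end_marker rest (acc ++ [PySem.Str.strip line])

def extract_block_comment_forward_py (lines : List String) (start_line : Int) (markers : String × String) : List String :=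
  let start_marker := markers.1
  let end_marker := markers.2
  -- lines[start_line]: Pre_ guarantees the index is in range, so the "" default is never used
  let start_line_text := PySem.List.pyGetD lines start_line ""
  let start_pos := PySem.Str.find start_line_text start_marker
  let after_start := PySem.Str.strip (PySem.Str.slice start_line_text (some (start_pos + (PySem.Str.len start_marker : Int))) none)
  if PySem.Str.isIn end_marker after_start then
    let end_pos := PySem.Str.find after_start end_marker
    let content := PySem.Str.strip (PySem.Str.slice after_start none (some end_pos))
    if content ≠ "" then [content] else []
  else
    let comment_lines := if after_start ≠ "" then [after_start] else []
    pvLoopA lines end_marker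
      (PySem.List.pyRange (start_line + 1) (min (start_line + 50) (lines.length : Int)) 1)
      comment_lines

-- ===== PORT B =====
def extract_block_comment_forward_py_alt (lines : List String) (start_line : Int) (markers : String × String) : List String :=
  let start_marker := markers.1
  let end_marker := markers.2
  let text := PySem.List.pyGetD lines start_line ""
  let after_start := PySem.Str.strip (PySem.Str.slice text (some (PySem.Str.find text start_marker + (PySem.Str.len start_marker : Int))) none)
  if PySem.Str.isIn end_marker after_start then
    let content := PySem.Str.strip (PySem.Str.slice after_start none (some (PySem.Str.find after_start end_marker)))
    if content ≠ "" then [content] else []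
  else
    let window := PySem.List.pyRange (start_line + 1) (min (start_line + 50) (lines.length : Int)) 1
    let head := if after_start ≠ "" then [after_start] else []
    match window.find? (fun i => PySem.Str.isIn end_marker (PySem.List.pyGetD lines i "")) with
    | none => head ++ window.map (fun i => PySem.Str.strip (PySem.List.pyGetD lines i ""))
    | some e =>
      let endline := PySem.List.pyGetD lines e ""
      let before_end := PySem.Str.strip (PySem.Str.slice endline none (some (PySem.Str.find endline end_marker)))
      head ++ (PySem.List.pyRange (start_line + 1) e 1).map (fun i => PySem.Str.strip (PySem.List.pyGetD lines i ""))
           ++ (if before_end ≠ "" then [before_end] else [])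

-- ===== PRECONDITION & SPEC =====
-- Pre_ excludes exactly the inputs where Python A raises IndexError on lines[start_line].
def Pre_extract_block_comment_forward_py (lines : List String) (start_line : Int) (_markers : String × String) : Prop :=
  PySem.Raise.InRange lines.length start_line
instance (lines : List String) (start_line : Int) (markers : String × String) : Decidable (Pre_extract_block_comment_forward_py lines start_line markers) := by unfold Pre_extract_block_comment_forward_py; infer_instance

def pvWitness_extract_block_comment_forward_py : List String × Int × (String × String) :=
  (["/* a", " b", " c */ tail"], 0, ("/*", "*/"))

def Spec_extract_block_comment_forward_py (lines : List String) (start_line : Int) (markers : String × String) (out : List String) : Prop := out = extract_block_comment_forward_py_alt lines start_line markers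
instance (lines : List String) (start_line : Int) (markers : String × String) (out : List String) : Decidable (Spec_extract_block_comment_forward_py lines start_line markers out) := by unfold Spec_extract_block_comment_forward_py; infer_instance

-- ===== CLAIM (what is proved, stated in full; the proofs are below) =====
def Claim_equal_extract_block_comment_forward_py : Prop := ∀ (lines : List String) (start_line : Int) (markers : String × String), Dom_extract_block_comment_forward_py lines start_line markers → Pre_extract_block_comment_forward_py lines start_line markers → Spec_extract_block_comment_forward_py lines start_line markers (extract_block_comment_forward_py lines start_line markers)

-- ===== LEMMAS AND PROOFS =====

-- A's break-loop over an index range equals B's locate-then-gather form.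
lemma pvLoopA_eq (lines : List String) (em : String) :
    ∀ (n : Nat) (a b : Int), (b - a).toNat = n → ∀ (acc : List String),
    pvLoopA lines em (PySem.List.pyRange a b 1) acc =
      match (PySem.List.pyRange a b 1).find?
          (fun i => PySem.Str.isIn em (PySem.List.pyGetD lines i "")) with
      | none => acc ++ (PySem.List.pyRange a b 1).map (fun i => PySem.Str.strip (PySem.List.pyGetD lines i ""))
      | some e =>
        let endline := PySem.List.pyGetD lines e ""
        let before_end := PySem.Str.strip (PySem.Str.slice endline none (some (PySem.Str.find endline em)))
        acc ++ (PySem.List.pyRange a e 1).map (fun i => PySem.Str.strip (PySem.List.pyGetD lines i ""))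
            ++ (if before_end ≠ "" then [before_end] else []) := by
  intro n
  induction n with
  | zero =>
    intro a b h acc
    rw [PySem.List.pyRange_one_eq_nil (by omega)]
    simp only [pvLoopA, List.find?, List.map_nil, List.append_nil]
  | succ m ih =>
    intro a b h acc
    rw [PySem.List.pyRange_one_cons (by omega)]
    by_cases hp : PySem.Str.isIn em (PySem.List.pyGetD lines a "") = true
    · simp only [pvLoopA, List.find?, hp]
      rw [PySem.List.pyRange_one_eq_nil (le_refl a)]
      simp only [List.map_nil]
      split_ifs <;> simp_all
    · simp only [pvLoopA, List.find?, hp, Bool.false_eq_true, if_false]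
      rw [ih (a + 1) b (by omega)]
      cases hf : (PySem.List.pyRange (a + 1) b 1).find?
          (fun i => PySem.Str.isIn em (PySem.List.pyGetD lines i "")) with
      | none => simp
      | some e =>
        have he : e ∈ PySem.List.pyRange (a + 1) b 1 := List.mem_of_find?_eq_some hf
        have hae : a < e := by
          have := (PySem.List.mem_pyRange_one).mp he
          omega
        simp only [PySem.List.pyRange_one_cons hae]
        simp

-- ===== VERDICT (by name: the statement is the Claim_ definition above) =====
theorem extract_block_comment_forward_py_spec : Claim_equal_extract_block_comment_forward_py := by
  intro lines start_line markers _ _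
  unfold Spec_extract_block_comment_forward_py
  unfold extract_block_comment_forward_py extract_block_comment_forward_py_alt
  dsimp only
  split
  · rfl
  · rw [pvLoopA_eq lines markers.2
        ((min (start_line + 50) (lines.length : Int)) - (start_line + 1)).toNat
        (start_line + 1) (min (start_line + 50) (lines.length : Int)) rfl]
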